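-- pv_equiv track=rewrite | github.com/Kontowicz/Daily-Interview-Pro | solutions/day_15.py | findPythagoreanTriplets
-- ===== SOURCE A (Python) =====
-- def findPythagoreanTriplets(array):
--     dict = {}
--     for item in array:
--         dict[item * item] = 0
--
--     for i, i_val in enumerate(array):
--         for j, j_val in enumerate(array):
--             if j == i:
--                 continue
--             if (i_val * i_val) + (j_val * j_val) in dict:
--                 return True
--     return False
-- ===== SOURCE B (Python) =====
-- def findPythagoreanTriplets(array):
--     squares = sorted(x * x for x in array)
--     n = len(squares)
--     for t in set(squares):
--         lo, hi = 0, n - 1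
--         while lo < hi:
--             s = squares[lo] + squares[hi]
--             if s == t:
--                 return True
--             if s < t:
--                 lo += 1
--             else:
--                 hi -= 1
--     return False
-- ===== Notes on version B (the rewrite author's own statement) =====
-- stated objective: alternative
-- what changed: Replaces A's quadratic all-pairs scan with a membership dict by a sort of the squares followed by a two-pointer scan per distinct square target.
import Mathlib
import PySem

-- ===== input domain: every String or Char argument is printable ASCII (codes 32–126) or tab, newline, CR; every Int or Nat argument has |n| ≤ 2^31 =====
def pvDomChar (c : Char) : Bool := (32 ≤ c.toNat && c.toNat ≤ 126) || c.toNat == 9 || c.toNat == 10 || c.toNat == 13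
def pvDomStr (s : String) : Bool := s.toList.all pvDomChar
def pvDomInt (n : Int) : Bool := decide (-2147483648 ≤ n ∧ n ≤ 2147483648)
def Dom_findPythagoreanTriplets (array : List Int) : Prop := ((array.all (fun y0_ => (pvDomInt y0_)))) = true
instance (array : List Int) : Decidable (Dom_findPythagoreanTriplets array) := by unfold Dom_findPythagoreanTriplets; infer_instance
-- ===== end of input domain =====

-- B replaces A's quadratic all-pairs membership scan by sort-once + a two-pointer scan per
-- distinct square target (an alternative algorithm, same worst-case cost).

-- ===== PORT A =====
def findPythagoreanTriplets (array : List Int) : Bool :=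
  let dict : PySem.Dict Int Int :=
    array.foldl (fun d item => d.insert (item * item) 0) PySem.Dict.empty
  (PySem.List.enumerate array).any (fun p =>
    (PySem.List.enumerate array).any (fun q =>
      if q.1 == p.1 then false
      else dict.contains (p.2 * p.2 + q.2 * q.2)))

-- ===== PORT B =====
-- the while-loop of Source B; squares[lo]/squares[hi] are exact here: in B's execution
-- the indices satisfy 0 ≤ lo < hi ≤ n-1, so pyGet? always returns some
def twoPtr (squares : List Int) (t : Int) (lo hi : Int) : Bool :=
  if lo < hi then
    let s := (PySem.List.pyGet? squares lo).getD 0 + (PySem.List.pyGet? squares hi).getD 0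
    if s == t then true
    else if s < t then twoPtr squares t (lo + 1) hi
    else twoPtr squares t lo (hi - 1)
  else false
termination_by (hi - lo).toNat
decreasing_by all_goals omega

def findPythagoreanTriplets_alt (array : List Int) : Bool :=
  let squares := PySem.List.sorted (array.map (fun x => x * x)) (fun x => x) false
  let n := squares.length
  (PySem.Set.ofList squares).any (fun t => twoPtr squares t 0 ((n : Int) - 1))

-- ===== PRECONDITION & SPEC =====
def Spec_findPythagoreanTriplets (array : List Int) (out : Bool) : Prop := out = findPythagoreanTriplets_alt array
instance (array : List Int) (out : Bool) : Decidable (Spec_findPythagoreanTriplets array out) := by unfold Spec_findPythagoreanTriplets; infer_instance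

-- ===== CLAIM (what is proved, stated in full; the proofs are below) =====
def Claim_equal_findPythagoreanTriplets : Prop := ∀ (array : List Int), Dom_findPythagoreanTriplets array → Spec_findPythagoreanTriplets array (findPythagoreanTriplets array)

-- ===== LEMMAS AND PROOFS =====

-- "two entries of l at distinct positions sum to t", stated multiset-invariantly
def GoodPair (t : Int) (l : List Int) : Prop := ∃ x y : Int, x + y = t ∧ List.Subperm [x, y] l

lemma goodPair_of_perm {t : Int} {l l' : List Int} (h : l.Perm l') : GoodPair t l → GoodPair t l' := by
  rintro ⟨x, y, hxy, hsub⟩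
  exact ⟨x, y, hxy, hsub.trans h.subperm⟩

lemma pair_sublist_of_indices (l : List Int) (i j : Nat) (hij : i < j) (hj : j < l.length)
    (hi : i < l.length) : List.Sublist [l[i], l[j]] l := by
  induction l generalizing i j with
  | nil => simp at hj
  | cons a tl ih =>
    cases i with
    | zero =>
      cases j with
      | zero => omega
      | succ j' =>
        simp only [List.getElem_cons_zero, List.getElem_cons_succ]
        exact List.Sublist.cons₂ a (List.singleton_sublist.mpr (List.getElem_mem _))
    | succ i' =>
      cases j with
      | zero => omega
      | succ j' =>
        simp only [List.getElem_cons_succ]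
        exact List.Sublist.cons a (ih i' j' (by omega) (by simpa using hj) (by simpa using hi))

lemma indices_of_pair_sublist {x y : Int} {l : List Int} (h : List.Sublist [x, y] l) :
    ∃ i j : Nat, i < j ∧ j < l.length ∧ l[i]? = some x ∧ l[j]? = some y := by
  induction l with
  | nil => simp at h
  | cons a tl ih =>
    cases h with
    | cons _ h' =>
      obtain ⟨i, j, hij, hj, hx, hy⟩ := ih h'
      exact ⟨i + 1, j + 1, by omega, by simp only [List.length_cons]; omega,
        by simpa using hx, by simpa using hy⟩
    | cons₂ _ h' =>
      obtain ⟨j, hj, hy⟩ := List.getElem_of_mem (List.singleton_sublist.mp h')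
      exact ⟨0, j + 1, by omega, by simp only [List.length_cons]; omega,
        by simp, by simp [hj, hy]⟩

lemma goodPair_iff_indices (t : Int) (l : List Int) :
    GoodPair t l ↔ ∃ i j : Nat, i < j ∧ j < l.length ∧ l.getD i 0 + l.getD j 0 = t := by
  constructor
  · rintro ⟨x, y, hxy, hsub⟩
    obtain ⟨l', hperm, hsl⟩ := hsub
    have hlen : l'.length = 2 := by simpa using hperm.length_eq
    match l', hlen with
    | [u, v], _ =>
      have hsum : u + v = x + y := by simpa using hperm.sum_eq
      obtain ⟨i, j, hij, hj, hu, hv⟩ := indices_of_pair_sublist hsl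
      refine ⟨i, j, hij, hj, ?_⟩
      rw [List.getD_eq_getElem?_getD, List.getD_eq_getElem?_getD, hu, hv]
      simpa [hsum] using hxy
  · rintro ⟨i, j, hij, hj, hsum⟩
    refine ⟨l[i], l[j], ?_, ?_⟩
    · rw [List.getD_eq_getElem?_getD, List.getD_eq_getElem?_getD] at hsum
      simpa [List.getElem?_eq_getElem, hj, (by omega : i < l.length)] using hsum
    · exact (pair_sublist_of_indices l i j hij hj (by omega)).subperm

lemma foldl_insert_contains (l : List Int) (d : PySem.Dict Int Int) (k : Int) :
    (l.foldl (fun d item => d.insert (item * item) 0) d).contains k = true ↔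
      k ∈ l.map (fun x => x * x) ∨ d.contains k = true := by
  induction l generalizing d with
  | nil => simp
  | cons a tl ih =>
    simp only [List.foldl_cons, List.map_cons, List.mem_cons, ih,
      PySem.Dict.contains_insert, Bool.or_eq_true, beq_iff_eq]
    tauto

lemma pyGetD0 (s : List Int) (i : Int) (h0 : 0 ≤ i) (h : i < s.length) :
    (PySem.List.pyGet? s i).getD 0 = s.getD i.toNat 0 := by
  simp [PySem.List.pyGet?, PySem.List.pyIdx?, h0, h, List.getD_eq_getElem?_getD]

lemma getD_mono (s : List Int) (hs : s.Pairwise (· ≤ ·)) (a b : Nat) (hab : a ≤ b)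
    (hb : b < s.length) : s.getD a 0 ≤ s.getD b 0 := by
  rcases eq_or_lt_of_le hab with rfl | hlt
  · exact le_refl _
  · have := (List.pairwise_iff_getElem.mp hs) a b (by omega) hb hlt
    simpa [List.getD_eq_getElem?_getD, List.getElem?_eq_getElem, hb,
      (by omega : a < s.length)] using this

lemma twoPtr_true_iff (s : List Int) (t lo hi : Int) :
    s.Pairwise (· ≤ ·) → 0 ≤ lo → hi < s.length →
    (twoPtr s t lo hi = true ↔
      ∃ i j : Nat, lo ≤ (i : Int) ∧ i < j ∧ (j : Int) ≤ hi ∧ s.getD i 0 + s.getD j 0 = t) := by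
  induction lo, hi using twoPtr.induct s t with
  | case1 lo hi hlt v heq =>
    intro hs hlo hhi
    rw [twoPtr, if_pos hlt]
    show (if v == t then true else _) = true ↔ _
    rw [if_pos heq]
    have hveq : v = s.getD lo.toNat 0 + s.getD hi.toNat 0 := by
      show (PySem.List.pyGet? s lo).getD 0 + (PySem.List.pyGet? s hi).getD 0 = _
      rw [pyGetD0 s lo hlo (by omega), pyGetD0 s hi (by omega) hhi]
    refine iff_of_true rfl ⟨lo.toNat, hi.toNat, by omega, by omega, by omega, ?_⟩
    rw [← hveq]; exact beq_iff_eq.mp heq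
  | case2 lo hi hlt v hne hv ih =>
    intro hs hlo hhi
    rw [twoPtr, if_pos hlt]
    show (if v == t then true else if v < t then twoPtr s t (lo + 1) hi
          else twoPtr s t lo (hi - 1)) = true ↔ _
    rw [if_neg hne, if_pos hv, ih hs (by omega) hhi]
    have hveq : v = s.getD lo.toNat 0 + s.getD hi.toNat 0 := by
      show (PySem.List.pyGet? s lo).getD 0 + (PySem.List.pyGet? s hi).getD 0 = _
      rw [pyGetD0 s lo hlo (by omega), pyGetD0 s hi (by omega) hhi]
    constructor
    · rintro ⟨i, j, h1, h2, h3, h4⟩; exact ⟨i, j, by omega, h2, h3, h4⟩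
    · rintro ⟨i, j, h1, h2, h3, h4⟩
      refine ⟨i, j, ?_, h2, h3, h4⟩
      by_contra hilo
      have hieq : (i : Int) = lo := by omega
      have hieq' : i = lo.toNat := by omega
      have hjle : s.getD j 0 ≤ s.getD hi.toNat 0 :=
        getD_mono s hs j hi.toNat (by omega) (by omega)
      have hconn : (PySem.List.pyGet? s lo).getD 0 + (PySem.List.pyGet? s hi).getD 0 =
          s.getD lo.toNat 0 + s.getD hi.toNat 0 := hveq
      have hv' : ((PySem.List.pyGet? s lo).getD 0 + (PySem.List.pyGet? s hi).getD 0) < t := hv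
      rw [hieq'] at h4
      omega
  | case3 lo hi hlt v hne hv ih =>
    intro hs hlo hhi
    rw [twoPtr, if_pos hlt]
    show (if v == t then true else if v < t then twoPtr s t (lo + 1) hi
          else twoPtr s t lo (hi - 1)) = true ↔ _
    rw [if_neg hne, if_neg hv, ih hs hlo (by omega)]
    have hveq : v = s.getD lo.toNat 0 + s.getD hi.toNat 0 := by
      show (PySem.List.pyGet? s lo).getD 0 + (PySem.List.pyGet? s hi).getD 0 = _
      rw [pyGetD0 s lo hlo (by omega), pyGetD0 s hi (by omega) hhi]
    constructor
    · rintro ⟨i, j, h1, h2, h3, h4⟩; exact ⟨i, j, h1, h2, by omega, h4⟩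
    · rintro ⟨i, j, h1, h2, h3, h4⟩
      refine ⟨i, j, h1, h2, ?_, h4⟩
      by_contra hjhi
      have hjeq : j = hi.toNat := by omega
      have hige : s.getD lo.toNat 0 ≤ s.getD i 0 :=
        getD_mono s hs lo.toNat i (by omega) (by omega)
      have hconn : (PySem.List.pyGet? s lo).getD 0 + (PySem.List.pyGet? s hi).getD 0 =
          s.getD lo.toNat 0 + s.getD hi.toNat 0 := hveq
      have hv' : ¬ ((PySem.List.pyGet? s lo).getD 0 + (PySem.List.pyGet? s hi).getD 0) < t := hv
      have hne' : ((PySem.List.pyGet? s lo).getD 0 + (PySem.List.pyGet? s hi).getD 0) ≠ t := by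
        simpa using hne
      rw [hjeq] at h4
      omega
  | case4 lo hi hlt =>
    intro hs hlo hhi
    rw [twoPtr, if_neg hlt]
    constructor
    · intro h; cases h
    · rintro ⟨i, j, h1, h2, h3, _⟩; exfalso; omega

lemma A_iff_idx (array : List Int) : findPythagoreanTriplets array = true ↔
    ∃ i j : Nat, i < array.length ∧ j < array.length ∧ j ≠ i ∧
      (array.getD i 0 * array.getD i 0 + array.getD j 0 * array.getD j 0)
        ∈ array.map (fun x => x * x) := by
  simp only [findPythagoreanTriplets, List.any_eq_true, PySem.List.mem_enumerate_iff]
  constructor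
  · rintro ⟨p, ⟨i, hi, rfl⟩, q, ⟨j, hj, rfl⟩, hcond⟩
    simp only [zero_add] at hcond
    split_ifs at hcond with hji
    rw [foldl_insert_contains] at hcond
    simp only [PySem.Dict.contains_empty] at hcond
    refine ⟨i, j, hi, hj, ?_, ?_⟩
    · intro h; exact hji (by simp [h])
    · rcases hcond with h | h
      · simpa [List.getD_eq_getElem?_getD, List.getElem?_eq_getElem, hi, hj] using h
      · cases h
  · rintro ⟨i, j, hi, hj, hne, hmem⟩
    refine ⟨(0 + i, array[i]), ⟨i, hi, rfl⟩, (0 + j, array[j]), ⟨j, hj, rfl⟩, ?_⟩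
    have hij : ¬ (((0 : Int) + (j : Int) == 0 + (i : Int)) = true) := by
      simp only [beq_iff_eq, zero_add]
      intro h; exact hne (by exact_mod_cast h)
    rw [if_neg hij, foldl_insert_contains]
    exact Or.inl (by
      simpa [List.getD_eq_getElem?_getD, List.getElem?_eq_getElem, hi, hj] using hmem)

lemma getD_map_sq (array : List Int) (i : Nat) (hi : i < array.length) :
    (array.map (fun x => x * x)).getD i 0 = array.getD i 0 * array.getD i 0 := by
  simp [List.getD_eq_getElem?_getD, hi]

-- A returns true iff some square of an element is the sum of the squares of two
-- elements at distinct indices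
lemma findPythagoreanTriplets_iff (array : List Int) :
    findPythagoreanTriplets array = true ↔
      ∃ t ∈ array.map (fun x => x * x), GoodPair t (array.map (fun x => x * x)) := by
  rw [A_iff_idx]
  constructor
  · rintro ⟨i, j, hi, hj, hne, hmem⟩
    refine ⟨_, hmem, ?_⟩
    rw [goodPair_iff_indices]
    rcases Nat.lt_or_ge i j with hij | hij
    · exact ⟨i, j, hij, by simpa using hj,
        by rw [getD_map_sq array i hi, getD_map_sq array j hj]⟩
    · refine ⟨j, i, by omega, by simpa using hi, ?_⟩
      rw [getD_map_sq array i hi, getD_map_sq array j hj]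
      ring
  · rintro ⟨t, hmem, hgp⟩
    rw [goodPair_iff_indices] at hgp
    obtain ⟨i, j, hij, hj, hsum⟩ := hgp
    have hj' : j < array.length := by simpa using hj
    have hi' : i < array.length := by omega
    refine ⟨i, j, hi', hj', by omega, ?_⟩
    rw [← getD_map_sq array i hi', ← getD_map_sq array j hj', hsum]
    exact hmem

lemma findPythagoreanTriplets_alt_iff (array : List Int) :
    findPythagoreanTriplets_alt array = true ↔
      ∃ t ∈ array.map (fun x => x * x), GoodPair t (array.map (fun x => x * x)) := by
  have hperm : (PySem.List.sorted (array.map (fun x => x * x)) (fun x => x) false).Perm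
      (array.map (fun x => x * x)) := PySem.List.sorted_perm _ _ _
  have hpw : (PySem.List.sorted (array.map (fun x => x * x)) (fun x => x) false).Pairwise
      (· ≤ ·) := by simpa using PySem.List.sorted_pairwise (array.map (fun x => x * x)) (fun x => x)
  simp only [findPythagoreanTriplets_alt, List.any_eq_true, PySem.Set.mem_ofList]
  constructor
  · rintro ⟨t, htmem, htp⟩
    rw [twoPtr_true_iff _ _ _ _ hpw (by omega) (by omega)] at htp
    obtain ⟨i, j, h0, hij, hle, hsum⟩ := htp
    refine ⟨t, hperm.mem_iff.mp htmem, goodPair_of_perm hperm ?_⟩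
    rw [goodPair_iff_indices]
    exact ⟨i, j, hij, by omega, hsum⟩
  · rintro ⟨t, htmem, hgp⟩
    refine ⟨t, hperm.mem_iff.mpr htmem, ?_⟩
    rw [twoPtr_true_iff _ _ _ _ hpw (by omega) (by omega)]
    have hgp' := goodPair_of_perm hperm.symm hgp
    rw [goodPair_iff_indices] at hgp'
    obtain ⟨i, j, hij, hj, hsum⟩ := hgp'
    exact ⟨i, j, by omega, hij, by omega, hsum⟩

-- ===== VERDICT (by name: the statement is the Claim_ definition above) =====
theorem findPythagoreanTriplets_spec : Claim_equal_findPythagoreanTriplets := by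
  intro array _
  unfold Spec_findPythagoreanTriplets
  have h := (findPythagoreanTriplets_iff array).trans
    (findPythagoreanTriplets_alt_iff array).symm
  cases ha : findPythagoreanTriplets array with
  | true => exact (h.mp ha).symm
  | false =>
    cases hb : findPythagoreanTriplets_alt array with
    | true => rw [← ha, h.mpr hb]
    | false => rfl
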